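-- pv_equiv track=rewrite | github.com/SamuelMarti22/Metroverso | metroversoApp/utils/functions.py | detect_transfers
-- ===== SOURCE A (Python) =====
-- def get_line_from_station(station):
--     """
--     Extracts the line from a station based on its ID.
--     For example: 'A01' -> 'A', 'M05' -> 'M'
--     """
--     if len(station) >= 2:
--         return station[0]  # First letter is the line
--     return None
--
-- def detect_transfers(route):
--     """
--     Detects transfer stations in a route.
--     Returns a list of stations where line changes are required.
--     """
--     if len(route) < 2:
--         return []
--
--     transfers = []
--     current_line = get_line_from_station(route[0])
--
--     for i in range(1, len(route)):
--         station_line = get_line_from_station(route[i])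
--         if station_line != current_line:
--             # Transfer detected at the previous station
--             transfers.append(route[i-1])
--             current_line = station_line
--
--     return transfers
-- ===== SOURCE B (Python) =====
-- def get_line_from_station(station):
--     """
--     Extracts the line from a station based on its ID.
--     For example: 'A01' -> 'A', 'M05' -> 'M'
--     """
--     if len(station) >= 2:
--         return station[0]  # First letter is the line
--     return None
--
--
-- def detect_transfers(route):
--     """
--     Detects transfer stations (divide-and-conquer formulation).
--
--     A station route[i] is a transfer iff its line differs from route[i+1]'s
--     line; adjacent pairs split cleanly, so recurse on the two halves sharing
--     the midpoint element and concatenate.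
--     """
--     n = len(route)
--     if n < 2:
--         return []
--     if n == 2:
--         if get_line_from_station(route[0]) != get_line_from_station(route[1]):
--             return [route[0]]
--         return []
--     m = n // 2
--     return detect_transfers(route[:m + 1]) + detect_transfers(route[m:])
-- ===== Notes on version B (the rewrite author's own statement) =====
-- stated objective: alternative
-- what changed: Replaces A's stateful left-to-right scan (mutable current_line) with a divide-and-conquer recursion: adjacent-pair line changes split at the midpoint with a one-element overlap, so the route is recursively halved and the two transfer lists concatenated.
import Mathlib
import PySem

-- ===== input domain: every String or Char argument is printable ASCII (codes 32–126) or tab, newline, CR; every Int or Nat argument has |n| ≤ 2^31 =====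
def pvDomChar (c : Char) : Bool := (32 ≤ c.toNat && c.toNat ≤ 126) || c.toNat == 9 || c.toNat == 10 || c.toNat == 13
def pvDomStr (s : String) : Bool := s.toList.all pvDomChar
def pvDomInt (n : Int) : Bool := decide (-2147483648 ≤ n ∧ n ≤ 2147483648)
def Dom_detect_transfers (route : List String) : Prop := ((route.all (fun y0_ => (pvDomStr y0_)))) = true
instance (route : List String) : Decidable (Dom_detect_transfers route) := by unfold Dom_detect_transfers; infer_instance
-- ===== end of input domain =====

-- B replaces A's stateful linear scan with a divide-and-conquer recursion on the route (midpoint split with one-element overlap); alternative decomposition, same result.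

-- ===== PORT A =====
def get_line_from_station (station : String) : Option String :=
  if 2 ≤ PySem.Str.len station then (PySem.Str.pyGet? station 0).map (fun c => String.ofList [c])
  else none

def detect_transfers (route : List String) : List String :=
  if (route.length : Int) < 2 then []
  else
    ((PySem.List.pyRange 1 (route.length : Int) 1).foldl
      (fun (st : List String × Option String) i =>
        let station_line := get_line_from_station (PySem.List.pyGetD route i "")
        if station_line ≠ st.2 then
          (st.1 ++ [PySem.List.pyGetD route (i - 1) ""], station_line)
        else st)
      ([], get_line_from_station (PySem.List.pyGetD route 0 ""))).1

-- ===== PORT B =====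
-- divide-and-conquer: n < 2 → []; n = 2 → compare the pair; else split at m = n // 2
-- with a one-element overlap and concatenate the recursive results.
def detect_transfers_alt (route : List String) : List String :=
  if route.length < 2 then []
  else if route.length = 2 then
    if get_line_from_station (PySem.List.pyGetD route 0 "")
        ≠ get_line_from_station (PySem.List.pyGetD route 1 "") then
      [PySem.List.pyGetD route 0 ""]
    else []
  else
    detect_transfers_alt (PySem.List.slice route none (some ((route.length / 2 + 1 : Nat) : Int))) ++
    detect_transfers_alt (PySem.List.slice route (some ((route.length / 2 : Nat) : Int)) none)
termination_by route.length
decreasing_by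
  · rw [PySem.List.slice_to_natCast]
    simp only [List.length_take]
    omega
  · rw [PySem.List.slice_from_natCast]
    simp only [List.length_drop]
    omega

-- ===== PRECONDITION & SPEC =====
def Spec_detect_transfers (route : List String) (out : List String) : Prop := out = detect_transfers_alt route
instance (route : List String) (out : List String) : Decidable (Spec_detect_transfers route out) := by unfold Spec_detect_transfers; infer_instance

-- ===== CLAIM (what is proved, stated in full; the proofs are below) =====
def Claim_equal_detect_transfers : Prop := ∀ (route : List String), Dom_detect_transfers route → Spec_detect_transfers route (detect_transfers route)

-- ===== LEMMAS AND PROOFS =====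

-- The list of transfer stations, characterised structurally on the route.
def pvChanges : String → List String → List String
  | _, [] => []
  | prev, x :: r =>
    (if get_line_from_station x ≠ get_line_from_station prev then [prev] else []) ++ pvChanges x r

-- A's step function, abstracted.
def pvStepA (route : List String) (st : List String × Option String) (i : Int) : List String × Option String :=
  let station_line := get_line_from_station (PySem.List.pyGetD route i "")
  if station_line ≠ st.2 then (st.1 ++ [PySem.List.pyGetD route (i - 1) ""], station_line) else st

-- A's index fold equals a fold over consecutive pairs.
lemma pvFoldA_eq_zip (route : List String) :
    ∀ (rest : List String) (k : Nat) (prev : String) (s : List String × Option String),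
    route.drop k = prev :: rest →
    (PySem.List.pyRange ((k : Int) + 1) (route.length : Int) 1).foldl (pvStepA route) s
      = ((prev :: rest).zip rest).foldl
          (fun st p =>
            let sl := get_line_from_station p.2
            if sl ≠ st.2 then (st.1 ++ [p.1], sl) else st) s := by
  intro rest
  induction rest with
  | nil =>
    intro k prev s h
    have hlen : route.length = k + 1 := by
      have := congrArg List.length h
      simp [List.length_drop] at this
      omega
    rw [PySem.List.pyRange_one_eq_nil (by omega)]
    simp
  | cons x r ih =>
    intro k prev s h
    have hlen : k + 2 ≤ route.length := by
      have := congrArg List.length h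
      simp [List.length_drop] at this
      omega
    have hk : route[k]? = some prev := by
      have : (route.drop k)[0]? = some prev := by rw [h]; rfl
      simpa using this
    have hk1 : route[k + 1]? = some x := by
      have : (route.drop k)[1]? = some x := by rw [h]; rfl
      simpa using this
    rw [PySem.List.pyRange_one_cons (by push_cast; omega)]
    rw [List.foldl_cons]
    have hstep : pvStepA route s ((k : Int) + 1) =
        (fun (st : List String × Option String) (p : String × String) =>
          let sl := get_line_from_station p.2
          if sl ≠ st.2 then (st.1 ++ [p.1], sl) else st) s (prev, x) := by
      have e1 : PySem.List.pyGetD route ((k : Int) + 1) "" = x := by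
        have : ((k : Int) + 1) = ((k + 1 : Nat) : Int) := by omega
        rw [this, PySem.List.pyGetD_natCast]
        simp [List.getD, hk1]
      have e2 : PySem.List.pyGetD route ((k : Int) + 1 - 1) "" = prev := by
        have : ((k : Int) + 1 - 1) = ((k : Nat) : Int) := by omega
        rw [this, PySem.List.pyGetD_natCast]
        simp [List.getD, hk]
      simp only [pvStepA, e1, e2]
    rw [hstep]
    have hdrop : route.drop (k + 1) = x :: r := by
      have : route.drop (k + 1) = (route.drop k).tail := by
        rw [List.tail_drop]
      rw [this, h]; rfl
    have := ih (k + 1) x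
      ((fun (st : List String × Option String) (p : String × String) =>
          let sl := get_line_from_station p.2
          if sl ≠ st.2 then (st.1 ++ [p.1], sl) else st) s (prev, x)) hdrop
    push_cast at this
    rw [this]
    rfl

-- The pair fold computes pvChanges when the carried line is the previous station's line.
lemma pvZipFold_eq_changes :
    ∀ (rest : List String) (prev : String) (ts : List String),
    (((prev :: rest).zip rest).foldl
        (fun (st : List String × Option String) (p : String × String) =>
          let sl := get_line_from_station p.2
          if sl ≠ st.2 then (st.1 ++ [p.1], sl) else st)
        (ts, get_line_from_station prev)).1 = ts ++ pvChanges prev rest := by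
  intro rest
  induction rest with
  | nil => intro prev ts; simp [pvChanges]
  | cons x r ih =>
    intro prev ts
    show (((x :: r).zip r).foldl _
        (if get_line_from_station x ≠ get_line_from_station prev
          then (ts ++ [prev], get_line_from_station x)
          else (ts, get_line_from_station prev))).1 = ts ++ pvChanges prev (x :: r)
    by_cases hne : get_line_from_station x ≠ get_line_from_station prev
    · rw [if_pos hne, ih x (ts ++ [prev])]
      simp [pvChanges, hne]
    · rw [if_neg hne]
      simp only [ne_eq, not_not] at hne
      rw [← hne, ih x ts]
      simp [pvChanges, hne]

-- pvChanges splits across an overlap element.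
lemma pvChanges_split (t1 : List String) :
    ∀ (prev x : String) (t2 : List String),
    pvChanges prev (t1 ++ x :: t2) = pvChanges prev (t1 ++ [x]) ++ pvChanges x t2 := by
  induction t1 with
  | nil => intro prev x t2; simp [pvChanges]
  | cons y r ih =>
    intro prev x t2
    simp only [List.cons_append, pvChanges, ih y x t2, List.append_assoc]

-- B equals pvChanges, by strong induction on the route length.
lemma pvAlt_eq_changes : ∀ (n : Nat) (route : List String), route.length = n →
    detect_transfers_alt route = (match route with | [] => [] | h :: t => pvChanges h t) := by
  intro n
  induction n using Nat.strong_induction_on with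
  | _ n ih =>
    intro route hn
    match route with
    | [] => rw [detect_transfers_alt]; rfl
    | [h] => rw [detect_transfers_alt]; rfl
    | [a, b] =>
      show detect_transfers_alt [a, b] = pvChanges a [b]
      rw [detect_transfers_alt]
      simp [pvChanges, PySem.List.pyGetD, eq_comm]
    | h :: x0 :: x1 :: t0 =>
      set t : List String := x0 :: x1 :: t0 with ht
      have hT : 2 ≤ t.length := by simp [ht]
      have hlen' : (h :: t).length = t.length + 1 := by simp
      set m : Nat := (h :: t).length / 2 with hm
      have hm' : m = (t.length + 1) / 2 := by rw [hm, hlen']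
      have hm1 : 1 ≤ m := by omega
      have hmle : m ≤ t.length := by omega
      rw [detect_transfers_alt]
      rw [if_neg (by omega), if_neg (by omega), PySem.List.slice_to_natCast,
        PySem.List.slice_from_natCast]
      have htake : (h :: t).take (m + 1) = h :: t.take m := by simp
      have hdrop : (h :: t).drop m = t.drop (m - 1) := by
        have hms : m = (m - 1) + 1 := by omega
        rw [hms]; rfl
      have hmlt : m - 1 < t.length := by omega
      have hdropc : t.drop (m - 1) = t[m - 1] :: t.drop m := by
        have hms : m - 1 + 1 = m := by omega
        rw [List.drop_eq_getElem_cons hmlt, hms]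
      have htakem : t.take m = t.take (m - 1) ++ [t[m - 1]] := by
        have hts := List.take_add_one (l := t) (i := m - 1)
        have hms : m - 1 + 1 = m := by omega
        rw [hms] at hts
        rw [hts, List.getElem?_eq_getElem hmlt]
        rfl
      have e1 : (h :: t.take m).length = m + 1 := by
        simp [List.length_take]
        omega
      have e2 : (t.drop (m - 1)).length = t.length - (m - 1) := by
        simp [List.length_drop]
      have ih1 := ih (h :: t.take m).length (by rw [e1]; omega) (h :: t.take m) rfl
      have ih2 := ih (t.drop (m - 1)).length (by rw [e2]; omega) (t.drop (m - 1)) rfl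
      rw [htake, hdrop, ih1]
      rw [hdropc] at ih2 ⊢
      rw [ih2]
      show pvChanges h (t.take m) ++ pvChanges (t[m - 1]) (t.drop m) = pvChanges h t
      conv_rhs => rw [show t = t.take (m - 1) ++ t.drop (m - 1) from (List.take_append_drop _ _).symm, hdropc]
      rw [pvChanges_split, ← htakem]

-- ===== VERDICT (by name: the statement is the Claim_ definition above) =====
theorem detect_transfers_spec : Claim_equal_detect_transfers := by
  intro route _
  show detect_transfers route = detect_transfers_alt route
  rw [pvAlt_eq_changes route.length route rfl]
  match route with
  | [] => rfl
  | [h] => rfl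
  | h :: x :: t =>
    unfold detect_transfers
    rw [if_neg (by simp [List.length_cons])]
    have hfun : (fun (st : List String × Option String) (i : Int) =>
        let station_line := get_line_from_station (PySem.List.pyGetD (h :: x :: t) i "")
        if station_line ≠ st.2 then
          (st.1 ++ [PySem.List.pyGetD (h :: x :: t) (i - 1) ""], station_line)
        else st) = pvStepA (h :: x :: t) := rfl
    have h0 : PySem.List.pyGetD (h :: x :: t) 0 "" = h := PySem.List.pyGetD_zero_cons _ _ _
    have hA := pvFoldA_eq_zip (h :: x :: t) (x :: t) 0 h
      ([], get_line_from_station h) rfl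
    simp only [Nat.cast_zero, zero_add] at hA
    rw [hfun, h0, hA]
    exact pvZipFold_eq_changes (x :: t) h []
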